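-- pv_equiv track=rewrite | github.com/mohammadijoo/Control_and_Robotics_Tutorials | Autonomous_Mobile_Robots_Course/Chapter14/Lesson2/Chapter14_Lesson2.py | ascii_render_costmap
-- ===== SOURCE A (Python) =====
-- from typing import List
--
-- def ascii_render_costmap(costmap: List[List[int]]) -> str:
--     """
--     Render costmap with ASCII characters:
--       '#' lethal, '+' high, '.' low, ' ' free
--     """
--     lines = []
--     for row in costmap:
--         s = []
--         for c in row:
--             if c >= 254:
--                 s.append('#')
--             elif c >= 200:
--                 s.append('X')
--             elif c >= 120:
--                 s.append('+')
--             elif c >= 40: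
--                 s.append('.')
--             else:
--                 s.append(' ')
--         lines.append(''.join(s))
--     return "\n".join(lines)
-- ===== SOURCE B (Python) =====
-- from typing import List
--
-- LAYERS = ((40, '.'), (120, '+'), (200, 'X'), (254, '#'))
--
-- def ascii_render_costmap(costmap: List[List[int]]) -> str:
--     """Layered painting: start from an all-blank canvas and, for each
--     threshold layer in ascending order, overwrite every cell whose cost
--     reaches that threshold with the layer's character (last layer wins)."""
--     canvas = [[' '] * len(row) for row in costmap]
--     for t, ch in LAYERS:
--         for i, row in enumerate(costmap):
--             for j, c in enumerate(row):
--                 if c >= t: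
--                     canvas[i][j] = ch
--     return "\n".join(''.join(line) for line in canvas)
-- ===== Notes on version B (the rewrite author's own statement) =====
-- stated objective: alternative
-- what changed: Replaces the single pass with a per-cell if/elif cascade by layered painting: an all-blank canvas plus four successive whole-grid passes, each overwriting cells at or above its threshold with that layer's character, so the last applicable layer wins.
import Mathlib
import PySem

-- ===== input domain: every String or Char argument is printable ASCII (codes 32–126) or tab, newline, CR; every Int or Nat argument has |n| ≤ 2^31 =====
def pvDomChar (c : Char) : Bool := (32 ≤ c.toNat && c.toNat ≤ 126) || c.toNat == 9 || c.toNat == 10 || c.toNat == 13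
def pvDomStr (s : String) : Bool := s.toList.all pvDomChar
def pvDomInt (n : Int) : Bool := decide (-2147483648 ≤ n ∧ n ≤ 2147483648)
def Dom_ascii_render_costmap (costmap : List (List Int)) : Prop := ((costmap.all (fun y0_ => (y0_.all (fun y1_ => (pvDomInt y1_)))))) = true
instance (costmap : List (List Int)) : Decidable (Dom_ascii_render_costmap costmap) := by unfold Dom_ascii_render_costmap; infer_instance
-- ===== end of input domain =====

-- B renders by layered painting (blank canvas + four overwrite passes) instead of A's per-cell if/elif cascade (objective: alternative).

-- ===== PORT A =====
def ascii_render_costmap (costmap : List (List Int)) : String :=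
  let lines := costmap.foldl (fun lines row =>
    let s := row.foldl (fun s c =>
      if c ≥ 254 then s ++ ["#"]
      else if c ≥ 200 then s ++ ["X"]
      else if c ≥ 120 then s ++ ["+"]
      else if c ≥ 40 then s ++ ["."]
      else s ++ [" "]) ([] : List String)
    lines ++ [PySem.Str.join "" s]) ([] : List String)
  PySem.Str.join "\n" lines

-- ===== PORT B =====
def pvLayers : List (Int × Char) := [(40, '.'), (120, '+'), (200, 'X'), (254, '#')]

-- Python's indexed in-place writes canvas[i][j] = ch (for all i,j with c >= t) are
-- ported as a zipWith of the canvas with the same-shaped costmap — exact, since the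
-- canvas is built with one ' ' per costmap cell.
def ascii_render_costmap_alt (costmap : List (List Int)) : String :=
  let canvas := costmap.map (fun row => row.map (fun _ => ' '))
  let painted := pvLayers.foldl (fun canvas layer =>
    List.zipWith (fun line row =>
      List.zipWith (fun old c => if c ≥ layer.1 then layer.2 else old) line row)
      canvas costmap) canvas
  PySem.Str.join "\n" (painted.map (fun line => String.ofList line))

-- ===== PRECONDITION & SPEC =====
def Spec_ascii_render_costmap (costmap : List (List Int)) (out : String) : Prop := out = ascii_render_costmap_alt costmap
instance (costmap : List (List Int)) (out : String) : Decidable (Spec_ascii_render_costmap costmap out) := by unfold Spec_ascii_render_costmap; infer_instance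

-- ===== CLAIM (what is proved, stated in full; the proofs are below) =====
def Claim_equal_ascii_render_costmap : Prop := ∀ (costmap : List (List Int)), Dom_ascii_render_costmap costmap → Spec_ascii_render_costmap costmap (ascii_render_costmap costmap)

-- ===== LEMMAS AND PROOFS =====

-- the canonical per-cell character both programs compute
def pvCascade (c : Int) : Char :=
  if c ≥ 254 then '#' else if c ≥ 200 then 'X'
  else if c ≥ 120 then '+' else if c ≥ 40 then '.' else ' '

-- appending one element per item in a foldl is map
theorem pv_foldl_append {α β : Type} (g : α → β) (xs : List α) (acc : List β) :
    xs.foldl (fun s c => s ++ [g c]) acc = acc ++ xs.map g := by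
  induction xs generalizing acc with
  | nil => simp
  | cons x xs ih => simp [List.foldl, ih]

-- A's inner loop for one row produces the cascade row string
theorem pv_row_eq (row : List Int) :
    PySem.Str.join "" (row.foldl (fun s c =>
      if c ≥ 254 then s ++ ["#"]
      else if c ≥ 200 then s ++ ["X"]
      else if c ≥ 120 then s ++ ["+"]
      else if c ≥ 40 then s ++ ["."]
      else s ++ [" "]) ([] : List String))
    = String.ofList (row.map pvCascade) := by
  have hfun : (fun (s : List String) (c : Int) =>
      if c ≥ 254 then s ++ ["#"] else if c ≥ 200 then s ++ ["X"]
      else if c ≥ 120 then s ++ ["+"] else if c ≥ 40 then s ++ ["."] else s ++ [" "])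
      = (fun (s : List String) (c : Int) => s ++ [String.ofList [pvCascade c]]) := by
    funext s c
    unfold pvCascade
    split_ifs <;> rfl
  rw [hfun, pv_foldl_append (fun c : Int => String.ofList [pvCascade c]) row []]
  simp only [List.nil_append]
  apply String.ext
  simp only [PySem.Str.join, List.map_map, Function.comp_def, String.toList_ofList]
  rw [show ("".toList) = ([] : List Char) from rfl,
    ← PySem.Chars.join_nil_singletons (row.map pvCascade), List.map_map]
  rfl

-- A equals the canonical map form
theorem pv_A_canon (costmap : List (List Int)) :
    ascii_render_costmap costmap
      = PySem.Str.join "\n" (costmap.map (fun row => String.ofList (row.map pvCascade))) := by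
  unfold ascii_render_costmap
  congr 1
  rw [pv_foldl_append (fun row : List Int =>
    PySem.Str.join "" (row.foldl (fun s c =>
      if c ≥ 254 then s ++ ["#"]
      else if c ≥ 200 then s ++ ["X"]
      else if c ≥ 120 then s ++ ["+"]
      else if c ≥ 40 then s ++ ["."]
      else s ++ [" "]) ([] : List String))) costmap []]
  simp only [List.nil_append]
  exact congrArg (PySem.Str.join "\n") (List.map_congr_left (fun row _ => pv_row_eq row))

-- zipWith of a mapped copy of a list with the list itself is a map
theorem pv_zipWith_map_self {α β γ : Type} (f : β → α → γ) (g : α → β) (l : List α) :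
    List.zipWith f (l.map g) l = l.map (fun a => f (g a) a) := by
  induction l with
  | nil => rfl
  | cons x xs ih => simp [List.zipWith, ih]

-- one painting pass on a canvas that is a per-cell map of the costmap
theorem pv_paint_step (costmap : List (List Int)) (g : Int → Char) (t : Int) (ch : Char) :
    List.zipWith (fun line row =>
        List.zipWith (fun old c => if c ≥ t then ch else old) line row)
      (costmap.map (fun row => row.map g)) costmap
    = costmap.map (fun row => row.map (fun c => if c ≥ t then ch else g c)) := by
  rw [pv_zipWith_map_self]
  exact List.map_congr_left (fun row _ => pv_zipWith_map_self _ g row)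

-- B equals the canonical map form
theorem pv_B_canon (costmap : List (List Int)) :
    ascii_render_costmap_alt costmap
      = PySem.Str.join "\n" (costmap.map (fun row => String.ofList (row.map pvCascade))) := by
  unfold ascii_render_costmap_alt pvLayers
  simp only [List.foldl_cons, List.foldl_nil]
  rw [pv_paint_step costmap (fun _ => ' ') 40 '.',
      pv_paint_step costmap _ 120 '+',
      pv_paint_step costmap _ 200 'X',
      pv_paint_step costmap _ 254 '#']
  simp only [List.map_map, Function.comp_def]
  rfl

-- ===== VERDICT (by name: the statement is the Claim_ definition above) =====
theorem ascii_render_costmap_spec : Claim_equal_ascii_render_costmap := by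
  intro costmap _
  unfold Spec_ascii_render_costmap
  rw [pv_A_canon, pv_B_canon]
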